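-- pv_equiv track=rewrite | github.com/RANJUBISWAS/Basic-Python-Programming | strFrequency.py | strFrequency
-- ===== SOURCE A (Python) =====
-- import string
--
-- def strFrequency (inputStr):
--   inputStr = inputStr.translate(str.maketrans('','',string.whitespace))
--   tempDict = {}
--   for alphabate in inputStr:
--     if alphabate not in tempDict:
--       tempDict[alphabate] = 1
--     else:
--       tempDict[alphabate] += 1
--   return tempDict
-- ===== SOURCE B (Python) =====
-- import string
--
-- def strFrequency(inputStr):
--   inputStr = inputStr.translate(str.maketrans('','',string.whitespace))
--   return {c: inputStr.count(c) for c in dict.fromkeys(inputStr)}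
-- ===== Notes on version B (the rewrite author's own statement) =====
-- stated objective: idiomatic
-- what changed: The accumulating dict loop is replaced by a dict comprehension over the distinct characters (first-occurrence order via dict.fromkeys), each mapped to inputStr.count(c), re-scanning the string per distinct character instead of maintaining running totals in one sequential pass.
import Mathlib
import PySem

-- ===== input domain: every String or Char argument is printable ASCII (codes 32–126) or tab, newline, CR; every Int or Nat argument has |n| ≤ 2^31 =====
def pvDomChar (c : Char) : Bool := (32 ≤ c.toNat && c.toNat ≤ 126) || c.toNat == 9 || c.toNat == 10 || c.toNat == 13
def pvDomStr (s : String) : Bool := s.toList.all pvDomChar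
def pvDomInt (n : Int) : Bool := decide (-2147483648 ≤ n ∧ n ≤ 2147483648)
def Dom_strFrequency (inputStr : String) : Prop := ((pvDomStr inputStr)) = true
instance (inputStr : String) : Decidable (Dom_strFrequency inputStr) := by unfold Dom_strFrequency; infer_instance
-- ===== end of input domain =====

-- B replaces A's accumulating dict loop by a dict comprehension over the distinct characters,
-- each mapped to a .count re-scan of the stripped string (objective: idiomatic; not faster).

-- inputStr.translate(str.maketrans('','',string.whitespace)): deletes the six ASCII
-- whitespace characters ' \t\n\r\x0b\x0c' (exact hand port: translate with a deletion
-- table of these chars is exactly this filter; both ports use it verbatim).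
def pvStripWs (cs : List Char) : List Char :=
  cs.filter (fun c => decide (c ∉ [' ', '\t', '\n', '\r', Char.ofNat 11, Char.ofNat 12]))

-- ===== PORT A =====
-- Python iterates the chars of the stripped string; each char is a 1-char str (dict key).
def strFrequency (inputStr : String) : List (String × Int) :=
  let cs := (pvStripWs inputStr.toList).map (fun c => String.ofList [c])
  (cs.foldl
    (fun d a =>
      if d.contains a = false then d.insert a 1
      else d.insert a (d.getD a 0 + 1))   -- tempDict[a] exists in this branch, so get = getD
    PySem.Dict.empty).items

-- ===== PORT B =====
-- {c: t.count(c) for c in dict.fromkeys(t)}: a dict built by inserting, for each distinct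
-- char in first-occurrence order (PySem.List.dedup), its count in the stripped string.
def strFrequency_alt (inputStr : String) : List (String × Int) :=
  let t := pvStripWs inputStr.toList
  ((PySem.List.dedup t).foldl
    (fun d c => d.insert (String.ofList [c]) ((t.count c : Int)))
    PySem.Dict.empty).items

-- ===== PRECONDITION & SPEC =====
def Spec_strFrequency (inputStr : String) (out : List (String × Int)) : Prop := out = strFrequency_alt inputStr
instance (inputStr : String) (out : List (String × Int)) : Decidable (Spec_strFrequency inputStr out) := by unfold Spec_strFrequency; infer_instance

-- ===== CLAIM (what is proved, stated in full; the proofs are below) =====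
def Claim_equal_strFrequency : Prop := ∀ (inputStr : String), Dom_strFrequency inputStr → Spec_strFrequency inputStr (strFrequency inputStr)

-- ===== LEMMAS AND PROOFS =====

theorem pvMkSingleton_injective : Function.Injective (fun c : Char => String.ofList [c]) := by
  intro a b h
  simpa [String.toList_ofList] using congrArg String.toList h

theorem pvOfList_map_inj {α β : Type} [DecidableEq α] [DecidableEq β]
    (f : α → β) (hf : Function.Injective f) (l : List α) :
    PySem.Set.ofList (l.map f) = (PySem.Set.ofList l).map f := by
  induction l using List.reverseRecOn with
  | nil => rfl
  | append_singleton xs x ih =>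
      rw [List.map_append, List.map_singleton,
        PySem.Set.ofList_append_singleton, PySem.Set.ofList_append_singleton,
        PySem.Set.add_eq_ite, PySem.Set.add_eq_ite, ih]
      by_cases hx : x ∈ PySem.Set.ofList xs
      · rw [if_pos (List.mem_map_of_mem hx), if_pos hx]
      · rw [if_neg (by simpa [List.mem_map, hf.eq_iff] using hx), if_neg hx,
          List.map_append, List.map_singleton]

theorem pvFoldA_eq_counter (cs : List String) :
    cs.foldl
      (fun d a =>
        if d.contains a = false then d.insert a 1
        else d.insert a (d.getD a 0 + 1))
      PySem.Dict.empty = PySem.Dict.counter cs := by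
  rw [← PySem.Dict.foldl_insert_getD_add_one_eq_counter]
  apply List.foldl_ext
  intro d a _
  by_cases h : d.contains a = false
  · rw [if_pos h, PySem.Dict.getD_of_not_contains (h := h)]; norm_num
  · rw [if_neg h]

-- B's loop inserts distinct fresh keys into an empty dict, so its items are the mapped list.
theorem pvFoldB_items (t : List Char) :
    ((PySem.Set.ofList t).foldl
      (fun d c => d.insert (String.ofList [c]) ((t.count c : Int)))
      PySem.Dict.empty).items
    = (PySem.Set.ofList t).map (fun c => (String.ofList [c], (t.count c : Int))) := by
  rw [PySem.Dict.items_foldl_insert_fresh]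
  · rfl
  · intro a _; exact PySem.Dict.contains_empty _
  · exact ((PySem.Set.nodup_ofList t).map pvMkSingleton_injective)

-- ===== VERDICT (by name: the statement is the Claim_ definition above) =====
theorem strFrequency_spec : Claim_equal_strFrequency := by
  intro inputStr _
  unfold Spec_strFrequency strFrequency strFrequency_alt
  simp only [pvFoldA_eq_counter, PySem.Dict.items_counter,
    PySem.List.dedup_eq_ofList, pvFoldB_items,
    pvOfList_map_inj _ pvMkSingleton_injective, List.map_map]
  refine List.map_congr_left (fun c _ => ?_)
  simp [List.count_map_of_injective _ _ pvMkSingleton_injective]
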